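-- pv_equiv track=rewrite | github.com/NguyenQuangTruc/project | demo.py | list_soLe_beHonN
-- ===== SOURCE A (Python) =====
-- def list_soLe_beHonN(n):
--     kq = []
--     i = n - 1
--     while (i > 0):
--         if i % 3 == 1:
--             kq.append(i)
--         i -= 1
--     return kq
-- ===== SOURCE B (Python) =====
-- def list_soLe_beHonN(n):
--     start = (n - 1) - ((n - 2) % 3)
--     return list(range(start, 0, -3))
-- ===== Notes on version B (the rewrite author's own statement) =====
-- stated objective: faster
-- what changed: Replaces the descending scan that mod-tests every candidate integer with a closed-form start value and a single stride range over exactly the matching values.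
import Mathlib
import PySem

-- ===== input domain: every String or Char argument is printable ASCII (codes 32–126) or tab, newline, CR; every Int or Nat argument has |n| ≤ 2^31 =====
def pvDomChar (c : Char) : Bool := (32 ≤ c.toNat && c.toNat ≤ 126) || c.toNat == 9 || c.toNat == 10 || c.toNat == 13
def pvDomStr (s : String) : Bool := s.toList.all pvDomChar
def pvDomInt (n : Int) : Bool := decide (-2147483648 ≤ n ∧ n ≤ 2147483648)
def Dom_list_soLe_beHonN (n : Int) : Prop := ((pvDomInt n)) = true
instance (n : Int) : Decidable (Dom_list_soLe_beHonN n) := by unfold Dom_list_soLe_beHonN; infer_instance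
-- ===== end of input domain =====

-- B replaces A's descending scan that mod-tests every integer below n with a closed-form
-- start value and a single stride-(-3) range (objective: faster by a constant factor).

-- ===== PORT A =====
-- the while-loop of A: i counts down, kq accumulates appended values
def loopA (i : Int) (kq : List Int) : List Int :=
  if 0 < i then
    loopA (i - 1) (if PySem.Int.mod i 3 == 1 then kq ++ [i] else kq)
  else kq
termination_by i.toNat
decreasing_by omega

def list_soLe_beHonN (n : Int) : List Int := loopA (n - 1) []

-- ===== PORT B =====
def list_soLe_beHonN_alt (n : Int) : List Int :=
  let start := (n - 1) - PySem.Int.mod (n - 2) 3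
  PySem.List.pyRange start 0 (-3)

-- ===== PRECONDITION & SPEC =====
def Spec_list_soLe_beHonN (n : Int) (out : List Int) : Prop := out = list_soLe_beHonN_alt n
instance (n : Int) (out : List Int) : Decidable (Spec_list_soLe_beHonN n out) := by unfold Spec_list_soLe_beHonN; infer_instance

-- ===== CLAIM (what is proved, stated in full; the proofs are below) =====
def Claim_equal_list_soLe_beHonN : Prop := ∀ (n : Int), Dom_list_soLe_beHonN n → Spec_list_soLe_beHonN n (list_soLe_beHonN n)

-- ===== LEMMAS AND PROOFS =====

lemma pyRange_neg3_nil (s : Int) (h : s ≤ 0) : PySem.List.pyRange s 0 (-3) = [] := by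
  unfold PySem.List.pyRange
  norm_num
  intro h'
  omega

lemma pyRange_neg3_cons (s : Int) (h : 0 < s) :
    PySem.List.pyRange s 0 (-3) = s :: PySem.List.pyRange (s - 3) 0 (-3) := by
  unfold PySem.List.pyRange
  norm_num
  rw [if_pos h]
  by_cases h3 : 3 < s
  · rw [if_pos h3]
    have hc : ((s + 3 - 1) / 3).toNat = ((s - 1) / 3).toNat + 1 := by omega
    rw [hc, List.range_succ_eq_map]
    simp only [List.map_cons, List.map_map, Nat.cast_zero]
    refine List.cons_eq_cons.mpr ⟨by ring, ?_⟩
    apply List.map_congr_left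
    intro k _
    simp [Function.comp, Nat.succ_eq_add_one]
    ring
  · rw [if_neg h3]
    have hc : ((s + 3 - 1) / 3).toNat = 1 := by omega
    rw [hc]
    simp only [List.range_succ, List.range_zero, List.nil_append, List.map_cons, List.map_nil,
      Nat.cast_zero]
    norm_num

lemma fmod3 (a : Int) : PySem.Int.mod a 3 = a % 3 := by
  simp only [PySem.Int.mod]
  rw [Int.fmod_eq_emod]
  norm_num

-- the loop's result characterised: kq followed by the stride-(-3) range from the largest
-- j ≤ i with j ≡ 1 (mod 3)
lemma loopA_eq (m : Nat) : ∀ (i : Int), i.toNat ≤ m → ∀ (kq : List Int),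
    loopA i kq = kq ++ PySem.List.pyRange (i - PySem.Int.mod (i - 1) 3) 0 (-3) := by
  induction m with
  | zero =>
    intro i hi kq
    have hle : i ≤ 0 := by omega
    rw [loopA, if_neg (by omega)]
    have hm := fmod3 (i - 1)
    have hm' : (0:Int) ≤ (i - 1) % 3 := Int.emod_nonneg _ (by norm_num)
    rw [pyRange_neg3_nil _ (by omega), List.append_nil]
  | succ m ih =>
    intro i hi kq
    by_cases hpos : 0 < i
    · rw [loopA, if_pos hpos]
      rw [ih (i - 1) (by omega)]
      have hm2 := fmod3 (i - 1)
      have hm3 : PySem.Int.mod (i - 1 - 1) 3 = (i - 2) % 3 := by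
        rw [fmod3]; omega
      by_cases h1 : i % 3 = 1
      · rw [if_pos (by simp [h1])]
        have hs : i - (i - 1) % 3 = i := by omega
        have hs' : i - 1 - (i - 2) % 3 = i - 3 := by omega
        rw [hm2, hm3, hs, hs', pyRange_neg3_cons i hpos]
        simp
      · rw [if_neg (by simp [h1])]
        have hs : i - (i - 1) % 3 = i - 1 - (i - 2) % 3 := by omega
        rw [hm2, hm3, hs]
    · rw [loopA, if_neg hpos]
      have hm := fmod3 (i - 1)
      have hm' : (0:Int) ≤ (i - 1) % 3 := Int.emod_nonneg _ (by norm_num)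
      rw [pyRange_neg3_nil _ (by omega), List.append_nil]

-- ===== VERDICT (by name: the statement is the Claim_ definition above) =====
theorem list_soLe_beHonN_spec : Claim_equal_list_soLe_beHonN := by
  intro n _
  unfold Spec_list_soLe_beHonN list_soLe_beHonN list_soLe_beHonN_alt
  rw [loopA_eq (n - 1).toNat (n - 1) le_rfl []]
  simp only [List.nil_append, fmod3]
  congr 1
  omega
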